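-- pv_equiv track=rewrite | github.com/kimyt511/baekjoon | 2023/11/11_7.py | get_cor
-- ===== SOURCE A (Python) =====
-- def get_cor(
--     arr, dir
-- ):  # 현재방향이 주어졌을 때,(방향은 북,동,남,서를 0,1,2,3이라고 지정) 주어진 arr값만큼 방향을 바꿔가며 이동, 최종 좌표를 반환
--     x, y = 0, 0
--     arr_v = [(0, 1), (1, 0), (0, -1), (-1, 0)]
--     i = dir
--     for num in arr:
--         x += num * arr_v[i % 4][0]
--         y += num * arr_v[i % 4][1]
--         i += 1
--     return (x, y)
-- ===== SOURCE B (Python) =====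
-- def get_cor(arr, dir):
--     # bucket the moves by step index mod 4, then combine once at the end:
--     # the step at position p moves in direction (dir + p) % 4, so bucket
--     # j = p % 4 contributes +1 to x iff (dir + j) % 4 == 1, etc.
--     s = [0, 0, 0, 0]
--     p = 0
--     for num in arr:
--         s[p % 4] += num
--         p += 1
--     x = s[(1 - dir) % 4] - s[(3 - dir) % 4]
--     y = s[(0 - dir) % 4] - s[(2 - dir) % 4]
--     return (x, y)
-- ===== Notes on version B (the rewrite author's own statement) =====
-- stated objective: alternative
-- what changed: Replaces the sequential walk with a rotating direction index and per-step unit-vector lookup by a residue-class bucketing pass (sums of arr grouped by index mod 4) combined once at the end via the signed picks s[(1-dir)%4]-s[(3-dir)%4] and s[(-dir)%4]-s[(2-dir)%4].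
import Mathlib
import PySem

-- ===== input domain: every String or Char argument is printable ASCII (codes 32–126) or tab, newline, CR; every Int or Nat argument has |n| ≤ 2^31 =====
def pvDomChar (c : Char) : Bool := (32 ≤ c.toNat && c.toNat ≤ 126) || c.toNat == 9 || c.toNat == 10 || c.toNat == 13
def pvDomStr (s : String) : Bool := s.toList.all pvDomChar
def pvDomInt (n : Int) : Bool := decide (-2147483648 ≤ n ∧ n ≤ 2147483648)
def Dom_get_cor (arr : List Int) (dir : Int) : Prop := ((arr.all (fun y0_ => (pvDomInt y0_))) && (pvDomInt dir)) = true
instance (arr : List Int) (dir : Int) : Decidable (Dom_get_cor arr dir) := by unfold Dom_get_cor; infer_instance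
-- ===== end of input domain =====

-- B replaces the rotating-index walk by mod-4 bucket sums combined once at the end (alternative decomposition, same O(n) cost).

-- ===== PORT A =====
def arrV : List (Int × Int) := [(0, 1), (1, 0), (0, -1), (-1, 0)]

-- the for-loop of A: state (x, y, i); arr_v[i % 4] via pyGet? (i % 4 ∈ [0,4), so the getD default is never used)
def get_cor_loop : List Int → Int × Int × Int → Int × Int × Int
  | [], st => st
  | num :: rest, (x, y, i) =>
      let v := (PySem.List.pyGet? arrV (PySem.Int.mod i 4)).getD (0, 0)
      get_cor_loop rest (x + num * v.1, y + num * v.2, i + 1)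

def get_cor (arr : List Int) (dir : Int) : Int × Int :=
  let st := get_cor_loop arr (0, 0, dir)
  (st.1, st.2.1)

-- ===== PORT B =====
-- the for-loop of Source B: state (s0,s1,s2,s3) (the 4-element list s, exact since p % 4 ∈ {0,1,2,3}) and counter p
def bucket_loop : List Int → (Int × Int × Int × Int) × Int → (Int × Int × Int × Int) × Int
  | [], st => st
  | num :: rest, ((s0, s1, s2, s3), p) =>
      let r := PySem.Int.mod p 4
      bucket_loop rest
        ((if r = 0 then s0 + num else s0,
          if r = 1 then s1 + num else s1,
          if r = 2 then s2 + num else s2,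
          if r = 3 then s3 + num else s3), p + 1)

-- s[j] for j ∈ {0,1,2,3} (the combination indices are % 4 results, hence in range)
def sel (s : Int × Int × Int × Int) (j : Int) : Int :=
  if j = 0 then s.1 else if j = 1 then s.2.1 else if j = 2 then s.2.2.1 else s.2.2.2

def get_cor_alt (arr : List Int) (dir : Int) : Int × Int :=
  let s := (bucket_loop arr ((0, 0, 0, 0), 0)).1
  (sel s (PySem.Int.mod (1 - dir) 4) - sel s (PySem.Int.mod (3 - dir) 4),
   sel s (PySem.Int.mod (0 - dir) 4) - sel s (PySem.Int.mod (2 - dir) 4))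

-- ===== PRECONDITION & SPEC =====
def Spec_get_cor (arr : List Int) (dir : Int) (out : Int × Int) : Prop := out = get_cor_alt arr dir
instance (arr : List Int) (dir : Int) (out : Int × Int) : Decidable (Spec_get_cor arr dir out) := by unfold Spec_get_cor; infer_instance

-- ===== CLAIM (what is proved, stated in full; the proofs are below) =====
def Claim_equal_get_cor : Prop := ∀ (arr : List Int) (dir : Int), Dom_get_cor arr dir → Spec_get_cor arr dir (get_cor arr dir)

-- ===== LEMMAS AND PROOFS =====

-- the unit vector A uses at a step whose bucket (position mod 4) is j
def w (dir j : Int) : Int × Int := (PySem.List.pyGet? arrV (PySem.Int.mod (dir + j) 4)).getD (0, 0)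

theorem pymod4 (a : Int) : PySem.Int.mod a 4 = a % 4 :=
  PySem.Int.mod_eq_emod_of_pos (by norm_num)

-- loop invariant: A's walk starting at direction index dir + p equals the bucket deltas
-- weighted by the unit vector of each bucket
theorem core (arr : List Int) (dir : Int) :
    ∀ (p x y s0 s1 s2 s3 : Int),
      get_cor_loop arr (x, y, dir + p) =
        ((fun t : (Int × Int × Int × Int) × Int =>
            (x + (t.1.1 - s0) * (w dir 0).1 + (t.1.2.1 - s1) * (w dir 1).1
               + (t.1.2.2.1 - s2) * (w dir 2).1 + (t.1.2.2.2 - s3) * (w dir 3).1,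
             y + (t.1.1 - s0) * (w dir 0).2 + (t.1.2.1 - s1) * (w dir 1).2
               + (t.1.2.2.1 - s2) * (w dir 2).2 + (t.1.2.2.2 - s3) * (w dir 3).2,
             dir + p + arr.length))
          (bucket_loop arr ((s0, s1, s2, s3), p))) := by
  induction arr with
  | nil =>
      intro p x y s0 s1 s2 s3
      simp [get_cor_loop, bucket_loop]
  | cons num rest ih =>
      intro p x y s0 s1 s2 s3
      have hr : PySem.Int.mod p 4 = 0 ∨ PySem.Int.mod p 4 = 1 ∨
                PySem.Int.mod p 4 = 2 ∨ PySem.Int.mod p 4 = 3 := by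
        simp only [pymod4]; omega
      have hstep : dir + p + 1 = dir + (p + 1) := by ring
      rcases hr with h | h | h | h
      case inl =>
        have hv : ((PySem.List.pyGet? arrV (PySem.Int.mod (dir + p) 4)).getD (0, 0)) = w dir 0 := by
          unfold w; rw [show PySem.Int.mod (dir + p) 4 = PySem.Int.mod (dir + 0) 4 by
            simp only [pymod4] at h ⊢; omega]
        simp only [get_cor_loop, bucket_loop, h, hv, hstep, reduceIte, Int.reduceEq]
        rw [ih (p + 1) _ _ (s0 + num) s1 s2 s3]
        simp only [Prod.mk.injEq]
        refine ⟨by ring, by ring, by push_cast [List.length_cons]; ring⟩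
      case inr.inl =>
        have hv : ((PySem.List.pyGet? arrV (PySem.Int.mod (dir + p) 4)).getD (0, 0)) = w dir 1 := by
          unfold w; rw [show PySem.Int.mod (dir + p) 4 = PySem.Int.mod (dir + 1) 4 by
            simp only [pymod4] at h ⊢; omega]
        simp only [get_cor_loop, bucket_loop, h, hv, hstep, reduceIte, Int.reduceEq]
        rw [ih (p + 1) _ _ s0 (s1 + num) s2 s3]
        simp only [Prod.mk.injEq]
        refine ⟨by ring, by ring, by push_cast [List.length_cons]; ring⟩
      case inr.inr.inl =>
        have hv : ((PySem.List.pyGet? arrV (PySem.Int.mod (dir + p) 4)).getD (0, 0)) = w dir 2 := by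
          unfold w; rw [show PySem.Int.mod (dir + p) 4 = PySem.Int.mod (dir + 2) 4 by
            simp only [pymod4] at h ⊢; omega]
        simp only [get_cor_loop, bucket_loop, h, hv, hstep, reduceIte, Int.reduceEq]
        rw [ih (p + 1) _ _ s0 s1 (s2 + num) s3]
        simp only [Prod.mk.injEq]
        refine ⟨by ring, by ring, by push_cast [List.length_cons]; ring⟩
      case inr.inr.inr =>
        have hv : ((PySem.List.pyGet? arrV (PySem.Int.mod (dir + p) 4)).getD (0, 0)) = w dir 3 := by
          unfold w; rw [show PySem.Int.mod (dir + p) 4 = PySem.Int.mod (dir + 3) 4 by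
            simp only [pymod4] at h ⊢; omega]
        simp only [get_cor_loop, bucket_loop, h, hv, hstep, reduceIte, Int.reduceEq]
        rw [ih (p + 1) _ _ s0 s1 s2 (s3 + num)]
        simp only [Prod.mk.injEq]
        refine ⟨by ring, by ring, by push_cast [List.length_cons]; ring⟩

-- B's two signed picks equal the weighted bucket sums of `core`
theorem comb (dir t0 t1 t2 t3 : Int) :
    sel (t0, t1, t2, t3) (PySem.Int.mod (1 - dir) 4) - sel (t0, t1, t2, t3) (PySem.Int.mod (3 - dir) 4)
      = t0 * (w dir 0).1 + t1 * (w dir 1).1 + t2 * (w dir 2).1 + t3 * (w dir 3).1 ∧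
    sel (t0, t1, t2, t3) (PySem.Int.mod (0 - dir) 4) - sel (t0, t1, t2, t3) (PySem.Int.mod (2 - dir) 4)
      = t0 * (w dir 0).2 + t1 * (w dir 1).2 + t2 * (w dir 2).2 + t3 * (w dir 3).2 := by
  have hd : dir % 4 = 0 ∨ dir % 4 = 1 ∨ dir % 4 = 2 ∨ dir % 4 = 3 := by omega
  rcases hd with h | h | h | h
  case inl =>
    have m1 : PySem.Int.mod (1 - dir) 4 = 1 := by rw [pymod4]; omega
    have m3 : PySem.Int.mod (3 - dir) 4 = 3 := by rw [pymod4]; omega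
    have m0 : PySem.Int.mod (0 - dir) 4 = 0 := by rw [pymod4]; omega
    have m2 : PySem.Int.mod (2 - dir) 4 = 2 := by rw [pymod4]; omega
    have w0 : PySem.Int.mod (dir + 0) 4 = 0 := by rw [pymod4]; omega
    have w1 : PySem.Int.mod (dir + 1) 4 = 1 := by rw [pymod4]; omega
    have w2 : PySem.Int.mod (dir + 2) 4 = 2 := by rw [pymod4]; omega
    have w3 : PySem.Int.mod (dir + 3) 4 = 3 := by rw [pymod4]; omega
    simp only [w, sel, m1, m3, m0, m2, w0, w1, w2, w3]
    norm_num [arrV, PySem.List.pyGet?, PySem.List.pyIdx?, Int.reduceToNat, (show (Int.toNat 0) = 0 from rfl), (show (Int.toNat 1) = 1 from rfl), (show (Int.toNat 2) = 2 from rfl), (show (Int.toNat 3) = 3 from rfl), List.getElem_cons_zero, List.getElem_cons_succ]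
    constructor <;> ring
  case inr.inl =>
    have m1 : PySem.Int.mod (1 - dir) 4 = 0 := by rw [pymod4]; omega
    have m3 : PySem.Int.mod (3 - dir) 4 = 2 := by rw [pymod4]; omega
    have m0 : PySem.Int.mod (0 - dir) 4 = 3 := by rw [pymod4]; omega
    have m2 : PySem.Int.mod (2 - dir) 4 = 1 := by rw [pymod4]; omega
    have w0 : PySem.Int.mod (dir + 0) 4 = 1 := by rw [pymod4]; omega
    have w1 : PySem.Int.mod (dir + 1) 4 = 2 := by rw [pymod4]; omega
    have w2 : PySem.Int.mod (dir + 2) 4 = 3 := by rw [pymod4]; omega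
    have w3 : PySem.Int.mod (dir + 3) 4 = 0 := by rw [pymod4]; omega
    simp only [w, sel, m1, m3, m0, m2, w0, w1, w2, w3]
    norm_num [arrV, PySem.List.pyGet?, PySem.List.pyIdx?, Int.reduceToNat, (show (Int.toNat 0) = 0 from rfl), (show (Int.toNat 1) = 1 from rfl), (show (Int.toNat 2) = 2 from rfl), (show (Int.toNat 3) = 3 from rfl), List.getElem_cons_zero, List.getElem_cons_succ]
    constructor <;> ring
  case inr.inr.inl =>
    have m1 : PySem.Int.mod (1 - dir) 4 = 3 := by rw [pymod4]; omega
    have m3 : PySem.Int.mod (3 - dir) 4 = 1 := by rw [pymod4]; omega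
    have m0 : PySem.Int.mod (0 - dir) 4 = 2 := by rw [pymod4]; omega
    have m2 : PySem.Int.mod (2 - dir) 4 = 0 := by rw [pymod4]; omega
    have w0 : PySem.Int.mod (dir + 0) 4 = 2 := by rw [pymod4]; omega
    have w1 : PySem.Int.mod (dir + 1) 4 = 3 := by rw [pymod4]; omega
    have w2 : PySem.Int.mod (dir + 2) 4 = 0 := by rw [pymod4]; omega
    have w3 : PySem.Int.mod (dir + 3) 4 = 1 := by rw [pymod4]; omega
    simp only [w, sel, m1, m3, m0, m2, w0, w1, w2, w3]
    norm_num [arrV, PySem.List.pyGet?, PySem.List.pyIdx?, Int.reduceToNat, (show (Int.toNat 0) = 0 from rfl), (show (Int.toNat 1) = 1 from rfl), (show (Int.toNat 2) = 2 from rfl), (show (Int.toNat 3) = 3 from rfl), List.getElem_cons_zero, List.getElem_cons_succ]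
    constructor <;> ring
  case inr.inr.inr =>
    have m1 : PySem.Int.mod (1 - dir) 4 = 2 := by rw [pymod4]; omega
    have m3 : PySem.Int.mod (3 - dir) 4 = 0 := by rw [pymod4]; omega
    have m0 : PySem.Int.mod (0 - dir) 4 = 1 := by rw [pymod4]; omega
    have m2 : PySem.Int.mod (2 - dir) 4 = 3 := by rw [pymod4]; omega
    have w0 : PySem.Int.mod (dir + 0) 4 = 3 := by rw [pymod4]; omega
    have w1 : PySem.Int.mod (dir + 1) 4 = 0 := by rw [pymod4]; omega
    have w2 : PySem.Int.mod (dir + 2) 4 = 1 := by rw [pymod4]; omega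
    have w3 : PySem.Int.mod (dir + 3) 4 = 2 := by rw [pymod4]; omega
    simp only [w, sel, m1, m3, m0, m2, w0, w1, w2, w3]
    norm_num [arrV, PySem.List.pyGet?, PySem.List.pyIdx?, Int.reduceToNat, (show (Int.toNat 0) = 0 from rfl), (show (Int.toNat 1) = 1 from rfl), (show (Int.toNat 2) = 2 from rfl), (show (Int.toNat 3) = 3 from rfl), List.getElem_cons_zero, List.getElem_cons_succ]
    constructor <;> ring

-- ===== VERDICT (by name: the statement is the Claim_ definition above) =====
theorem get_cor_spec : Claim_equal_get_cor := by
  intro arr dir _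
  unfold Spec_get_cor get_cor get_cor_alt
  have h := core arr dir 0 0 0 0 0 0 0
  rw [show dir + 0 = dir by ring] at h
  rw [h]
  obtain ⟨⟨t0, t1, t2, t3⟩, p'⟩ := bucket_loop arr ((0, 0, 0, 0), 0)
  have hc := comb dir t0 t1 t2 t3
  simp only [Prod.mk.injEq]
  rw [hc.1, hc.2]
  constructor <;> ring
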